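-- pv_equiv track=rewrite | github.com/fglass/daily-zine | src/ziner/render.py | _zine_spreads
-- ===== SOURCE A (Python) =====
-- def _zine_spreads(page_count: int) -> list[tuple[int, int]]:
--     spreads: list[tuple[int, int]] = []
--     left = page_count - 1
--     right = 0
--
--     while left > right:
--         spreads.append((left, right))
--         right += 1
--         left -= 1
--         if left > right:
--             spreads.append((right, left))
--             right += 1
--             left -= 1
--
--     return spreads
-- ===== SOURCE B (Python) =====
-- def _zine_spreads(page_count: int) -> list[tuple[int, int]]:
--     return [
--         (page_count - 1 - j, j) if j % 2 == 0 else (j, page_count - 1 - j)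
--         for j in range(page_count // 2)
--     ]
-- ===== Notes on version B (the rewrite author's own statement) =====
-- stated objective: simpler
-- what changed: Replaced the two-pointer converging while-loop with mutable left/right state and an inner conditional append by a single comprehension over range(page_count // 2) that emits each pair from a closed-form parity rule on the index.
import Mathlib
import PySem

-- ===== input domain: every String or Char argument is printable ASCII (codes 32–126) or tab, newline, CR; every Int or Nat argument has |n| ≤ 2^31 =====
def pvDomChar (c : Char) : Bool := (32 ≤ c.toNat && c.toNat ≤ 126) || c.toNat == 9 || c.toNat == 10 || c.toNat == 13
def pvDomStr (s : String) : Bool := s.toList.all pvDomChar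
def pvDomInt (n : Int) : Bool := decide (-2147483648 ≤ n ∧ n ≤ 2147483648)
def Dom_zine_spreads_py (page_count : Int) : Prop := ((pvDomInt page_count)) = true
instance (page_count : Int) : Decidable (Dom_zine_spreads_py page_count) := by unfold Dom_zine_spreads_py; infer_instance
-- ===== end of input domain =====

-- B replaces A's two-pointer while-loop by a single comprehension over range(n // 2)
-- with a closed-form parity rule for each pair (objective: simpler).


-- ===== PORT A =====
-- A's while-loop: state (spreads, left, right); each body iteration appends (left, right),
-- advances the pointers, and conditionally appends (right, left) and advances again.
def pvZineLoopA (left right : Int) (spreads : List (Int × Int)) : List (Int × Int) :=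
  if _h : left > right then
    let spreads1 := spreads ++ [(left, right)]
    let right1 := right + 1
    let left1 := left - 1
    if left1 > right1 then
      pvZineLoopA (left1 - 1) (right1 + 1) (spreads1 ++ [(right1, left1)])
    else
      spreads1
  else
    spreads
termination_by (left - right).toNat
decreasing_by omega

def zine_spreads_py (page_count : Int) : List (Int × Int) :=
  pvZineLoopA (page_count - 1) 0 []

-- ===== PORT B =====
def zine_spreads_py_alt (page_count : Int) : List (Int × Int) :=
  (PySem.List.pyRange 0 (PySem.Int.floordiv page_count 2) 1).map
    (fun j => if PySem.Int.mod j 2 == 0 then (page_count - 1 - j, j) else (j, page_count - 1 - j))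

-- ===== PRECONDITION & SPEC =====
def Spec_zine_spreads_py (page_count : Int) (out : List (Int × Int)) : Prop := out = zine_spreads_py_alt page_count
instance (page_count : Int) (out : List (Int × Int)) : Decidable (Spec_zine_spreads_py page_count out) := by unfold Spec_zine_spreads_py; infer_instance

-- ===== CLAIM (what is proved, stated in full; the proofs are below) =====
def Claim_equal_zine_spreads_py : Prop := ∀ (page_count : Int), Dom_zine_spreads_py page_count → Spec_zine_spreads_py page_count (zine_spreads_py page_count)

-- ===== LEMMAS AND PROOFS =====

-- Characterisation of A's loop: starting at pointers (l, r) with l + r invariant, it emits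
-- exactly the pairs for indices j ∈ [r, (l+r+1)//2), alternating orientation with the
-- parity of j - r.
theorem pvZineLoopA_eq (l r : Int) (acc : List (Int × Int)) :
    pvZineLoopA l r acc =
      acc ++ (PySem.List.pyRange r (PySem.Int.floordiv (l + r + 1) 2) 1).map
        (fun j => if PySem.Int.mod (j - r) 2 == 0 then (l + r - j, j) else (j, l + r - j)) := by
  by_cases h : l > r
  · by_cases h2 : l - 1 > r + 1
    · -- two appends, then recurse at (l-2, r+2)
      rw [pvZineLoopA.eq_def]
      simp only [h, dif_pos]
      rw [pvZineLoopA_eq (l - 1 - 1) (r + 1 + 1)]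
      have hU : PySem.Int.floordiv (l + r + 1) 2 = PySem.Int.floordiv ((l - 1 - 1) + (r + 1 + 1) + 1) 2 := by
        ring_nf
      have hr1 : r < PySem.Int.floordiv (l + r + 1) 2 := by
        rw [PySem.Int.floordiv_eq_ediv_of_pos (by omega)]; omega
      have hr2 : r + 1 < PySem.Int.floordiv (l + r + 1) 2 := by
        rw [PySem.Int.floordiv_eq_ediv_of_pos (by omega)]; omega
      rw [← hU, PySem.List.pyRange_one_cons hr1, PySem.List.pyRange_one_cons hr2]
      simp only [List.map_cons, List.append_assoc, List.cons_append, List.nil_append]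
      have hmod0 : PySem.Int.mod (r - r) 2 == 0 := by simp
      have hmod1 : ¬ (PySem.Int.mod (r + 1 - r) 2 == 0) := by simp
      rw [if_pos hmod0, if_neg hmod1]
      have hfun : ∀ j : Int,
          (if PySem.Int.mod (j - (r + 1 + 1)) 2 == 0 then ((l - 1 - 1) + (r + 1 + 1) - j, j)
           else (j, (l - 1 - 1) + (r + 1 + 1) - j)) =
          (if PySem.Int.mod (j - r) 2 == 0 then (l + r - j, j) else (j, l + r - j)) := by
        intro j
        have : PySem.Int.mod (j - (r + 1 + 1)) 2 = PySem.Int.mod (j - r) 2 := by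
          rw [PySem.Int.mod_eq_emod_of_pos (show (0:Int) < 2 by norm_num),
              PySem.Int.mod_eq_emod_of_pos (show (0:Int) < 2 by norm_num)]
          omega
        rw [this]
        split <;> simp
      rw [List.map_congr_left (fun j _ => hfun j)]
      rw [if_pos (show r + 1 < l - 1 by omega)]
      have hsub : l + r - (r + 1) = l - 1 := by omega
      simp [hsub]
    · -- one append, loop ends: l = r + 1 or l = r + 2
      rw [pvZineLoopA.eq_def]
      simp only [h, dif_pos]
      rw [if_neg h2]
      have hU : PySem.Int.floordiv (l + r + 1) 2 = r + 1 := by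
        rw [PySem.Int.floordiv_eq_ediv_of_pos (by omega)]; omega
      rw [hU, PySem.List.pyRange_one_cons (by omega), PySem.List.pyRange_one_eq_nil (by omega)]
      have hmod0 : PySem.Int.mod (r - r) 2 == 0 := by simp
      simp
  · -- loop never runs; the range is empty
    rw [pvZineLoopA.eq_def]
    simp only [h, dif_neg, not_false_iff]
    have : PySem.Int.floordiv (l + r + 1) 2 ≤ r := by
      rw [PySem.Int.floordiv_eq_ediv_of_pos (by omega)]; omega
    rw [PySem.List.pyRange_one_eq_nil this]
    simp
termination_by (l - r).toNat
decreasing_by omega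

-- ===== VERDICT (by name: the statement is the Claim_ definition above) =====
theorem zine_spreads_py_spec : Claim_equal_zine_spreads_py := by
  intro n _
  unfold Spec_zine_spreads_py zine_spreads_py zine_spreads_py_alt
  rw [pvZineLoopA_eq]
  have hU : PySem.Int.floordiv (n - 1 + 0 + 1) 2 = PySem.Int.floordiv n 2 := by ring_nf
  rw [hU]
  simp only [List.nil_append]
  apply List.map_congr_left
  intro j _
  simp only [sub_zero, add_zero]
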